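-- pv_equiv track=rewrite | github.com/theredplanetsings/simsNstuff | csv_overlay.py | _normalize_fieldnames
-- ===== SOURCE A (Python) =====
-- def _normalize_fieldnames(fieldnames):
--     normalized = []
--     for name in fieldnames:
--         if name is None:
--             continue
--         key = name.strip().lower()
--         if key:
--             normalized.append(key)
--
--     if len(set(normalized)) != len(normalized):
--         raise ValueError("CSV contains duplicate column names.")
--
--     return set(normalized)
-- ===== SOURCE B (Python) =====
-- def _normalize_fieldnames(fieldnames):
--     # staged passes: normalize, filter, then detect duplicates by sorting
--     # and scanning adjacent neighbours (no hash-based counting).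
--     keys = [name.strip().lower() for name in fieldnames if name is not None]
--     keys = [k for k in keys if k]
--     srt = sorted(keys)
--     for a, b in zip(srt, srt[1:]):
--         if a == b:
--             raise ValueError("CSV contains duplicate column names.")
--     return set(keys)
-- ===== Notes on version B (the rewrite author's own statement) =====
-- stated objective: alternative
-- what changed: Duplicate detection by sorting the normalized keys and scanning adjacent neighbours for equality (staged comprehensions + sort), instead of A's accumulating loop with a len(set(...)) vs len comparison.
import Mathlib
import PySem

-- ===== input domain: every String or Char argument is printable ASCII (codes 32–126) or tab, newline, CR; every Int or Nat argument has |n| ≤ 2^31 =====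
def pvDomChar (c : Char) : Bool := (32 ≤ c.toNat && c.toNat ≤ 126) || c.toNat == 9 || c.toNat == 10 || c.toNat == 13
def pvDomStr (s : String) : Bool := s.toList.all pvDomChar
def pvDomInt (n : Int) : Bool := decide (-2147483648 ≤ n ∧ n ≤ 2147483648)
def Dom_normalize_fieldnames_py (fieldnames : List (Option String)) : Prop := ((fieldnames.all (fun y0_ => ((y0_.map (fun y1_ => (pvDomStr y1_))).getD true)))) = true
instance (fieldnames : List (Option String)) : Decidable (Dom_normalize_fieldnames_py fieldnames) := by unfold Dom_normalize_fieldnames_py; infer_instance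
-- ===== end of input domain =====

-- B detects duplicates by sorting the normalized keys and scanning adjacent neighbours
-- (staged comprehensions + sort), instead of A's accumulating loop with a len(set(...))
-- comparison; both raise ValueError on duplicates (excluded by Pre_): alternative.

-- ===== PORT A =====
def pvStepA (acc : List String) (name : Option String) : List String :=
  match name with
  | none => acc
  | some s =>
    let key := PySem.Str.lower (PySem.Str.strip s)
    if key ≠ "" then acc ++ [key] else acc

def normalize_fieldnames_py (fieldnames : List (Option String)) : List String :=
  let normalized : List String := fieldnames.foldl pvStepA []
  if PySem.Set.len (PySem.Set.ofList normalized) ≠ (normalized.length : Int) then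
    []  -- raise ValueError("CSV contains duplicate column names."): excluded by Pre_
  else
    PySem.Set.ofList normalized

-- ===== PORT B =====
def normalize_fieldnames_py_alt (fieldnames : List (Option String)) : List String :=
  -- [name.strip().lower() for name in fieldnames if name is not None]
  let keys0 : List String :=
    fieldnames.filterMap (fun name => name.map (fun s => PySem.Str.lower (PySem.Str.strip s)))
  -- [k for k in keys if k]
  let keys : List String := keys0.filter (fun k => k ≠ "")
  -- srt = sorted(keys)
  let srt : List String := PySem.List.sorted keys (fun x => x) false
  -- for a, b in zip(srt, srt[1:]): if a == b: raise  (srt[1:] = drop 1, exact for lists)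
  if (srt.zip (srt.drop 1)).any (fun p => p.1 == p.2) then
    []  -- raise ValueError("CSV contains duplicate column names."): excluded by Pre_
  else
    PySem.Set.ofList keys

-- ===== PRECONDITION & SPEC =====
-- Pre_ excludes inputs whose normalized (stripped, lowercased, non-empty) names contain a
-- duplicate: there BOTH programs raise ValueError("CSV contains duplicate column names.").
def Pre_normalize_fieldnames_py (fieldnames : List (Option String)) : Prop :=
  (fieldnames.filterMap (fun name => name.bind (fun s =>
    let k := PySem.Str.lower (PySem.Str.strip s)
    if k = "" then none else some k))).Nodup
instance (fieldnames : List (Option String)) : Decidable (Pre_normalize_fieldnames_py fieldnames) := by unfold Pre_normalize_fieldnames_py; infer_instance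

def pvWitness_normalize_fieldnames_py : List (Option String) := [some " Foo ", none, some "BAR", some "  "]

def Spec_normalize_fieldnames_py (fieldnames : List (Option String)) (out : List String) : Prop := out = normalize_fieldnames_py_alt fieldnames
instance (fieldnames : List (Option String)) (out : List String) : Decidable (Spec_normalize_fieldnames_py fieldnames out) := by unfold Spec_normalize_fieldnames_py; infer_instance

-- ===== CLAIM (what is proved, stated in full; the proofs are below) =====
def Claim_equal_normalize_fieldnames_py : Prop := ∀ (fieldnames : List (Option String)), Dom_normalize_fieldnames_py fieldnames → Pre_normalize_fieldnames_py fieldnames → Spec_normalize_fieldnames_py fieldnames (normalize_fieldnames_py fieldnames)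

-- ===== LEMMAS AND PROOFS =====

-- the normalized key of one (optional) fieldname, as Pre_ states it
def pvKey (name : Option String) : Option String :=
  name.bind (fun s =>
    let k := PySem.Str.lower (PySem.Str.strip s)
    if k = "" then none else some k)

-- A's accumulation loop produces exactly the filterMap of pvKey
theorem pvA_loop_eq (l : List (Option String)) (acc : List String) :
    l.foldl pvStepA acc = acc ++ l.filterMap pvKey := by
  induction l generalizing acc with
  | nil => simp
  | cons hd tl ih =>
    cases hd with
    | none => simpa [pvStepA, pvKey] using ih acc
    | some s =>
      rw [List.foldl_cons, List.filterMap_cons]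
      by_cases h : PySem.Str.lower (PySem.Str.strip s) = ""
      · simp only [pvStepA, pvKey, h, ite_not, Option.bind_some]
        simpa using ih acc
      · simp only [pvStepA, pvKey, ite_not, if_neg h, Option.bind_some]
        rw [ih (acc ++ [PySem.Str.lower (PySem.Str.strip s)])]
        simp [pvKey]

-- B's staged comprehensions compute the same key list as Pre_ states
theorem pvB_keys_eq (l : List (Option String)) :
    (l.filterMap (fun name => name.map (fun s => PySem.Str.lower (PySem.Str.strip s)))).filter
      (fun k => k ≠ "") = l.filterMap pvKey := by
  induction l with
  | nil => rfl
  | cons hd tl ih =>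
    cases hd with
    | none => simpa [pvKey] using ih
    | some s =>
      by_cases h : PySem.Str.lower (PySem.Str.strip s) = ""
      · simpa [pvKey, h] using ih
      · simpa [pvKey, h] using ih

-- no two adjacent elements of a duplicate-free list are equal
theorem pvNoAdjDup (l : List String) (h : l.Nodup) :
    (l.zip (l.drop 1)).any (fun p => p.1 == p.2) = false := by
  induction l with
  | nil => rfl
  | cons a tl ih =>
    cases tl with
    | nil => rfl
    | cons b t =>
      have hne : a ≠ b := by
        simp only [List.nodup_cons, List.mem_cons] at h
        exact fun e => h.1 (Or.inl e)
      have h' : (b :: t).Nodup := (List.nodup_cons.mp h).2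
      have htl := ih h'
      have hz : ((a :: b :: t).zip ((a :: b :: t).drop 1))
          = (a, b) :: ((b :: t).zip ((b :: t).drop 1)) := by simp
      rw [hz, List.any_cons, htl]
      simp [hne]

-- set(xs) of a duplicate-free list is the list itself
theorem pvOfList_nodup (l : List String) (h : l.Nodup) : PySem.Set.ofList l = l := by
  have gen : ∀ (l seen : List String), (seen ++ l).Nodup →
      l.foldl PySem.Set.add seen = seen ++ l := by
    intro l
    induction l with
    | nil => intro seen _; simp
    | cons hd tl ih =>
      intro seen hn
      have hnotmem : hd ∉ seen := by
        have := List.disjoint_of_nodup_append hn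
        intro hm
        exact this hm List.mem_cons_self
      have hadd : PySem.Set.add seen hd = seen ++ [hd] := by
        simp [PySem.Set.add, hnotmem]
      have hn' : ((seen ++ [hd]) ++ tl).Nodup := by
        simpa [List.append_assoc] using hn
      calc (hd :: tl).foldl PySem.Set.add seen
          = tl.foldl PySem.Set.add (seen ++ [hd]) := by simp [hadd]
        _ = (seen ++ [hd]) ++ tl := ih (seen ++ [hd]) hn'
        _ = seen ++ hd :: tl := by simp
  have := gen l [] (by simpa using h)
  simpa [PySem.Set.ofList_eq_foldl] using this

-- ===== VERDICT (by name: the statement is the Claim_ definition above) =====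
theorem normalize_fieldnames_py_spec : Claim_equal_normalize_fieldnames_py := by
  intro fieldnames _ hpre
  unfold Spec_normalize_fieldnames_py normalize_fieldnames_py normalize_fieldnames_py_alt
  have hnodup : (fieldnames.filterMap pvKey).Nodup := by
    simpa [pvKey, Pre_normalize_fieldnames_py] using hpre
  have hsortnd : (PySem.List.sorted (fieldnames.filterMap pvKey) (fun x => x) false).Nodup :=
    (PySem.List.sorted_perm (fieldnames.filterMap pvKey) (fun x => x) false).nodup_iff.mpr hnodup
  simp only [pvB_keys_eq, pvA_loop_eq fieldnames [], List.nil_append]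
  rw [pvOfList_nodup _ hnodup]
  rw [if_neg (by simp [PySem.Set.len])]
  rw [if_neg (by rw [pvNoAdjDup _ hsortnd]; exact Bool.false_ne_true)]
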